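-- pv_equiv track=rewrite | github.com/inkyouya/AcendasLoyalty | HotelDataMerge/data_merge_utils.py | pick_amenities
-- ===== SOURCE A (Python) =====
-- def pick_longest(data_list):
--     if not data_list:
--         return None
--     return sorted(data_list, key=len, reverse=True)[0]
--
-- def pick_amenities(data_list):
--     result = {}
--     amenities_types = set().union(*data_list)
--     for amenities_type in amenities_types:
--         amentity_list = []
--         for data_point in data_list:
--             if amenities_type in data_point:
--                 amentity_list.append(data_point[amenities_type])
--         result[amenities_type] = pick_longest(amentity_list)
--     return result
-- ===== SOURCE B (Python) =====
-- def pick_amenities(data_list):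
--     result = {}
--     for data_point in data_list:
--         for key, value in data_point.items():
--             if key not in result or len(value) > len(result[key]):
--                 result[key] = value
--     return result
-- ===== Notes on version B (the rewrite author's own statement) =====
-- stated objective: simpler
-- what changed: One streaming pass with inverted loop nesting: iterate the dicts in order keeping a running longest value per key, instead of building the key set up front, rescanning all dicts to collect a per-key bucket, and reverse-sorting each bucket.
import Mathlib
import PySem

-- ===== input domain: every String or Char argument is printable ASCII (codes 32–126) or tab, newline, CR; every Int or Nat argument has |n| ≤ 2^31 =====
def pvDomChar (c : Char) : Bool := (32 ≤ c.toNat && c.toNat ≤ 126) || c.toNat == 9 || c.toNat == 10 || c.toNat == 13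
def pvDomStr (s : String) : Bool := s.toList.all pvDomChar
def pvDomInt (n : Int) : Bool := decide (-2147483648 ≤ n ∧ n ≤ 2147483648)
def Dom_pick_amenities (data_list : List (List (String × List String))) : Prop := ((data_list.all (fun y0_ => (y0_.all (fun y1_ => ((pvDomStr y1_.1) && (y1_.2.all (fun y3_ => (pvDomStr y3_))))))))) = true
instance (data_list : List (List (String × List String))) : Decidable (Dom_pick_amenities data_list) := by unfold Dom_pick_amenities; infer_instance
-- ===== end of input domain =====

-- B replaces A's build-key-set / per-key-bucket / reverse-sort scheme by one streaming pass over the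
-- dicts keeping a running longest value per key (objective: simpler). Return-value equivalence only.


-- ===== PORT A =====
-- pick_longest: sorted(data_list, key=len, reverse=True)[0] on a nonempty list, None on []
def pick_longest (data_list : List (List String)) : Option (List String) :=
  if data_list = [] then none
  else (PySem.List.sorted data_list (fun x => x.length) true)[0]?

def pick_amenities (data_list : List (List (String × List String))) : List (String × List String) :=
  -- amenities_types = set().union(*data_list): the distinct keys (iterated here in first-encounter
  -- order; Python iterates its set in hash order, but the resulting dict is order-insensitive as a dict)
  let amenities_types : PySem.Set String :=
    PySem.Set.ofList (data_list.flatMap (fun d => d.map Prod.fst))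
  (amenities_types.foldl (fun result amenities_type =>
      let amentity_list := data_list.foldl (fun acc data_point =>
        match (PySem.Dict.mk data_point).get? amenities_type with
        | some v => acc ++ [v]      -- if amenities_type in data_point: append data_point[amenities_type]
        | none => acc) []
      -- pick_longest never returns None here (amentity_list is nonempty); getD [] is unreachable
      result.insert amenities_type ((pick_longest amentity_list).getD []))
    (PySem.Dict.empty : PySem.Dict String (List String))).items

-- ===== PORT B =====
def pick_amenities_alt (data_list : List (List (String × List String))) : List (String × List String) :=
  (data_list.foldl (fun result data_point =>
      data_point.foldl (fun result kv =>
        match result.get? kv.1 with                       -- key not in result …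
        | none => result.insert kv.1 kv.2
        | some cur =>                                     -- … or len(value) > len(result[key])
          if cur.length < kv.2.length then result.insert kv.1 kv.2 else result)
        result)
    (PySem.Dict.empty : PySem.Dict String (List String))).items

-- ===== PRECONDITION & SPEC =====
-- Pre_ requires each inner association list to have pairwise-distinct keys: a Python dict cannot
-- contain a duplicate key, so association lists with duplicate keys represent no Python input at all.
def Pre_pick_amenities (data_list : List (List (String × List String))) : Prop :=
  ∀ d ∈ data_list, (d.map Prod.fst).Nodup
instance (data_list : List (List (String × List String))) : Decidable (Pre_pick_amenities data_list) := by
  unfold Pre_pick_amenities; infer_instance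

def pvWitness_pick_amenities : (List (List (String × List String))) :=
  [[("pool", ["p"])], [("pool", ["p", "q"]), ("wifi", [])]]

def Spec_pick_amenities (data_list : List (List (String × List String))) (out : List (String × List String)) : Prop := out = pick_amenities_alt data_list
instance (data_list : List (List (String × List String))) (out : List (String × List String)) : Decidable (Spec_pick_amenities data_list out) := by unfold Spec_pick_amenities; infer_instance

-- ===== CLAIM (what is proved, stated in full; the proofs are below) =====
def Claim_equal_pick_amenities : Prop := ∀ (data_list : List (List (String × List String))), Dom_pick_amenities data_list → Pre_pick_amenities data_list → Spec_pick_amenities data_list (pick_amenities data_list)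

-- ===== LEMMAS AND PROOFS =====

-- the streaming "keep the longer, first wins ties" combination
def pvStep (b v : List String) : List String := if b.length < v.length then v else b

def pvRunMax : List (List String) → Option (List String)
  | [] => none
  | h :: t => some (t.foldl pvStep h)

def pvComb : Option (List String) → Option (List String) → Option (List String)
  | o, none => o
  | none, some v => some v
  | some b, some v => some (pvStep b v)

-- first-match lookup in one dict
def pvLk (d : List (String × List String)) (k : String) : Option (List String) :=
  (PySem.Dict.mk d).get? k

-- all values recorded for key k, in dict order
def pvVals (data : List (List (String × List String))) (k : String) : List (List String) :=
  data.filterMap (fun d => pvLk d k)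

def pvKeys (data : List (List (String × List String))) : List String :=
  PySem.Set.ofList (data.flatMap (fun d => d.map Prod.fst))

theorem pvStep_assoc (a b c : List String) : pvStep (pvStep a b) c = pvStep a (pvStep b c) := by
  simp only [pvStep]; split_ifs <;> first | rfl | omega

theorem pvComb_none (o : Option (List String)) : pvComb o none = o := by cases o <;> rfl

theorem pvComb_none_left (o : Option (List String)) : pvComb none o = o := by cases o <;> rfl

theorem pvComb_assoc (a b c : Option (List String)) :
    pvComb (pvComb a b) c = pvComb a (pvComb b c) := by
  cases a <;> cases b <;> cases c <;> simp [pvComb, pvStep_assoc]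

theorem pvRunMax_append (l₁ l₂ : List (List String)) :
    pvRunMax (l₁ ++ l₂) = pvComb (pvRunMax l₁) (pvRunMax l₂) := by
  cases l₁ with
  | nil => cases l₂ <;> rfl
  | cons h t =>
    cases l₂ with
    | nil => simp [pvRunMax, pvComb]
    | cons h₂ t₂ =>
      simp only [pvRunMax, List.cons_append, List.foldl_append, pvComb, List.foldl_cons]
      congr 1
      induction t₂ generalizing h₂ with
      | nil => rfl
      | cons x xs ih => simp only [List.foldl_cons, pvStep_assoc, ih]

theorem pvRunMax_toList (o : Option (List String)) : pvRunMax o.toList = o := by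
  cases o <;> rfl

theorem pvVals_cons (d : List (String × List String)) (rest : List (List (String × List String)))
    (k : String) : pvVals (d :: rest) k = (pvLk d k).toList ++ pvVals rest k := by
  cases h : pvLk d k <;> simp [pvVals, h]

-- ---- A-side ----

theorem pick_longest_eq_runMax (l : List (List String)) : pick_longest l = pvRunMax l := by
  cases l with
  | nil => rfl
  | cons h t =>
    have key : ∀ (t : List (List String)) (a : List String) (as : List (List String)),
        ∃ as', t.foldl (fun acc x =>
            PySem.List.insertBy (fun p q => decide (q.length < p.length)) x acc) (a :: as)
          = (t.foldl pvStep a) :: as' := by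
      intro t
      induction t with
      | nil => intro a as; exact ⟨as, rfl⟩
      | cons x xs ih =>
        intro a as
        simp only [List.foldl_cons, PySem.List.insertBy, pvStep]
        by_cases hx : a.length < x.length
        · simpa [hx] using ih x (a :: as)
        · simpa [hx] using ih a _
    simp only [pick_longest, pvRunMax, if_neg (List.cons_ne_nil h t),
      PySem.List.sorted_rev_eq_foldl_insertBy, List.foldl_cons]
    have h0 : PySem.List.insertBy (fun p q => decide (q.length < p.length)) h
        ([] : List (List String)) = [h] := rfl
    rw [h0]
    obtain ⟨as', has'⟩ := key t h []
    rw [has']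
    rfl

theorem amlist_eq_vals (data : List (List (String × List String))) (k : String) :
    data.foldl (fun acc data_point =>
        match (PySem.Dict.mk data_point).get? k with
        | some v => acc ++ [v]
        | none => acc) []
      = pvVals data k := by
  suffices h : ∀ (data : List (List (String × List String))) (acc : List (List String)),
      data.foldl (fun acc data_point =>
        match (PySem.Dict.mk data_point).get? k with
        | some v => acc ++ [v]
        | none => acc) acc = acc ++ pvVals data k by
    simpa using h data []
  intro data
  induction data with
  | nil => intro acc; simp [pvVals]
  | cons d rest ih =>
    intro acc
    simp only [List.foldl_cons, pvVals, List.filterMap_cons]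
    cases hd : pvLk d k <;> simp only [pvLk] at hd <;> simp [hd, ih, pvVals]

theorem pick_amenities_eq_ref (data : List (List (String × List String))) :
    pick_amenities data = (pvKeys data).map (fun k => (k, ((pvRunMax (pvVals data k)).getD []))) := by
  unfold pick_amenities
  dsimp only
  rw [PySem.Dict.items_foldl_insert_fresh
        (PySem.Set.ofList (data.flatMap (fun d => d.map Prod.fst))) (fun k => k)
        (fun k => (pick_longest (data.foldl (fun acc data_point =>
          match (PySem.Dict.mk data_point).get? k with
          | some v => acc ++ [v]
          | none => acc) [])).getD [])
        PySem.Dict.empty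
        (fun a _ => PySem.Dict.contains_empty a)
        (by exact (List.nodup_map_iff (fun _ _ h => h)).mpr (PySem.Set.nodup_ofList (data.flatMap (fun d => d.map Prod.fst))))]
  simp only [pvKeys]
  rw [show (PySem.Dict.empty : PySem.Dict String (List String)).items = [] from rfl,
    List.nil_append]
  exact List.map_congr_left (fun k _ => by rw [amlist_eq_vals, pick_longest_eq_runMax])

-- ---- B-side ----

theorem inner_get (ps : List (String × List String)) (hnd : (ps.map Prod.fst).Nodup)
    (r : PySem.Dict String (List String)) (k : String) :
    (ps.foldl (fun result kv =>
        match result.get? kv.1 with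
        | none => result.insert kv.1 kv.2
        | some cur => if cur.length < kv.2.length then result.insert kv.1 kv.2 else result) r).get? k
      = pvComb (r.get? k) (pvLk ps k) := by
  induction ps generalizing r with
  | nil => simp only [List.foldl_nil]; rw [show pvLk [] k = none from rfl, pvComb_none]
  | cons p rest ih =>
    obtain ⟨k0, v0⟩ := p
    simp only [List.map_cons, List.nodup_cons] at hnd
    obtain ⟨hp, hrest⟩ := hnd
    simp only [List.foldl_cons]
    rw [ih hrest]
    by_cases hk : k = k0
    · rw [hk]
      have hlkrest : pvLk rest k0 = none := by
        simp only [pvLk, PySem.Dict.get?_eq_none_iff_not_mem_keys]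
        simp [PySem.Dict.keys] at hp ⊢; exact hp
      have hlk : pvLk ((k0, v0) :: rest) k0 = some v0 := by
        simp [pvLk, PySem.Dict.get?_mk_cons]
      rw [hlkrest, hlk, pvComb_none]
      cases hr : r.get? k0 with
      | none => simp [PySem.Dict.get?_insert_self, pvComb]
      | some cur =>
        by_cases hlen : cur.length < v0.length
        · simp [hlen, PySem.Dict.get?_insert_self, pvComb, pvStep]
        · simp [hlen, hr, pvComb, pvStep]
    · have hlk : pvLk ((k0, v0) :: rest) k = pvLk rest k := by
        have hne : (k0 == k) = false := by
          simp only [beq_eq_false_iff_ne, ne_eq]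
          exact fun h => hk h.symm
        simp [pvLk, PySem.Dict.get?_mk_cons, hne]
      rw [hlk]
      congr 1
      cases hr : r.get? k0 with
      | none => simp [PySem.Dict.get?_insert, hk]
      | some cur =>
        by_cases hlen : cur.length < v0.length
        · simp [hlen, PySem.Dict.get?_insert, hk]
        · simp [hlen]

theorem inner_keys (ps : List (String × List String)) (r : PySem.Dict String (List String)) :
    (ps.foldl (fun result kv =>
        match result.get? kv.1 with
        | none => result.insert kv.1 kv.2
        | some cur => if cur.length < kv.2.length then result.insert kv.1 kv.2 else result) r).keys
      = PySem.Set.update r.keys (ps.map Prod.fst) := by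
  rw [PySem.Set.update_map_eq_foldl_add]
  induction ps generalizing r with
  | nil => rfl
  | cons p rest ih =>
    simp only [List.foldl_cons]
    rw [ih]
    congr 1
    cases hr : r.get? p.1 with
    | none =>
      have hc : r.contains p.1 = false := by
        rw [PySem.Dict.contains_eq_isSome_get?, hr]; rfl
      have hmem : p.1 ∉ r.keys := by
        rw [← PySem.Dict.contains_iff_mem_keys, hc]; simp
      simp [PySem.Dict.keys_insert_of_not_contains _ _ hc, PySem.Set.add, hmem]
    | some cur =>
      have hc : r.contains p.1 = true := by
        rw [PySem.Dict.contains_eq_isSome_get?, hr]; rfl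
      have hmem : p.1 ∈ r.keys := by rw [← PySem.Dict.contains_iff_mem_keys]; exact hc
      by_cases hlen : cur.length < p.2.length
      · simp [hlen, PySem.Dict.keys_insert_of_contains _ _ hc, PySem.Set.add, hmem]
      · simp [hlen, PySem.Set.add, hmem]

theorem outer_get (data : List (List (String × List String)))
    (hpre : ∀ d ∈ data, (d.map Prod.fst).Nodup)
    (r : PySem.Dict String (List String)) (k : String) :
    (data.foldl (fun result data_point =>
        data_point.foldl (fun result kv =>
          match result.get? kv.1 with
          | none => result.insert kv.1 kv.2
          | some cur => if cur.length < kv.2.length then result.insert kv.1 kv.2 else result)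
          result) r).get? k
      = pvComb (r.get? k) (pvRunMax (pvVals data k)) := by
  induction data generalizing r with
  | nil => simp only [List.foldl_nil]; rw [show pvVals [] k = [] from rfl]; exact (pvComb_none _).symm
  | cons d rest ih =>
    simp only [List.foldl_cons]
    rw [ih (fun x hx => hpre x (List.mem_cons_of_mem d hx)),
      inner_get d (hpre d (List.mem_cons_self)),
      pvVals_cons, pvRunMax_append, pvRunMax_toList, pvComb_assoc]

theorem outer_keys (data : List (List (String × List String)))
    (r : PySem.Dict String (List String)) :
    (data.foldl (fun result data_point =>
        data_point.foldl (fun result kv =>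
          match result.get? kv.1 with
          | none => result.insert kv.1 kv.2
          | some cur => if cur.length < kv.2.length then result.insert kv.1 kv.2 else result)
          result) r).keys
      = PySem.Set.update r.keys (data.flatMap (fun d => d.map Prod.fst)) := by
  induction data generalizing r with
  | nil => simp [PySem.Set.update_nil]
  | cons d rest ih =>
    simp only [List.foldl_cons, List.flatMap_cons]
    rw [ih, inner_keys, PySem.Set.update_append]

theorem pick_amenities_alt_eq_ref (data : List (List (String × List String)))
    (hpre : ∀ d ∈ data, (d.map Prod.fst).Nodup) :
    pick_amenities_alt data
      = (pvKeys data).map (fun k => (k, ((pvRunMax (pvVals data k)).getD []))) := by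
  unfold pick_amenities_alt
  have hk : (data.foldl (fun result data_point =>
        data_point.foldl (fun result kv =>
          match result.get? kv.1 with
          | none => result.insert kv.1 kv.2
          | some cur => if cur.length < kv.2.length then result.insert kv.1 kv.2 else result)
          result) (PySem.Dict.empty : PySem.Dict String (List String))).keys = pvKeys data := by
    rw [outer_keys, PySem.Dict.keys_empty, PySem.Set.update_nil_left, pvKeys]
  have hnd : (data.foldl (fun result data_point =>
        data_point.foldl (fun result kv =>
          match result.get? kv.1 with
          | none => result.insert kv.1 kv.2
          | some cur => if cur.length < kv.2.length then result.insert kv.1 kv.2 else result)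
          result) (PySem.Dict.empty : PySem.Dict String (List String))).keys.Nodup := by
    rw [hk]
    exact PySem.Set.nodup_ofList _
  rw [PySem.Dict.items_eq_map_keys _ hnd [], hk]
  refine List.map_congr_left (fun k _ => ?_)
  rw [PySem.Dict.getD_eq_get?_getD, outer_get data hpre, PySem.Dict.get?_empty, pvComb_none_left]

-- ===== VERDICT (by name: the statement is the Claim_ definition above) =====
theorem pick_amenities_spec : Claim_equal_pick_amenities := by
  intro data _hdom hpre
  unfold Spec_pick_amenities
  rw [pick_amenities_eq_ref, pick_amenities_alt_eq_ref data hpre]
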